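-- pv_equiv track=rewrite | github.com/melquizedecm/pythonProjects | Hamming.py | calcularFila
-- ===== SOURCE A (Python) =====
-- def calcularFila(cadenaAuto, salto, cadenaTemporal=""):
--     '''Este metodo es para calcular paridades individuales '''
--     originalCadenaAuto = cadenaAuto
--
--     # recortamos la cadena para que empiece en ese elemento
--     cadenaAuto = cadenaAuto[salto - 1:]
--     # agregamos una varible apoyo para conservar las "coordenadas"
--     n = "N" * (salto - 1)
--     cadenaTemporal += n
--
--     n = "N" * salto
--     nsalto = salto * 2
--     while len(cadenaAuto) > 0:
--         # tomamos los elementos segun la paridad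
--         cadenaTemporal += cadenaAuto[:salto]
--         # brincamos los elementos segun la paridad
--         cadenaAuto = cadenaAuto[nsalto:]
--         # agregamos una varible apoyo para conservar las coordenadas
--         cadenaTemporal += n
--
--     # truncamos hasta el largo de la cadena con paridad
--     cadenaTemporal = cadenaTemporal[:len(originalCadenaAuto)]
--
--     return cadenaTemporal
-- ===== SOURCE B (Python) =====
-- def calcularFila(cadenaAuto, salto, cadenaTemporal=""):
--     '''Este metodo es para calcular paridades individuales '''
--     chars = [c if ((i + 1) // salto) % 2 == 1 else "N" for i, c in enumerate(cadenaAuto)]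
--     return (cadenaTemporal + "".join(chars))[:len(cadenaAuto)]
-- ===== Notes on version B (the rewrite author's own statement) =====
-- stated objective: simpler
-- what changed: Replaces the block-consuming while loop over shrinking slices with a single per-position pass: character i is kept exactly when ((i+1)//salto) is odd, collected by one comprehension and one join; Pre_ excludes salto<=0 with a nonempty string, where A loops forever (never returns).
import Mathlib
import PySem

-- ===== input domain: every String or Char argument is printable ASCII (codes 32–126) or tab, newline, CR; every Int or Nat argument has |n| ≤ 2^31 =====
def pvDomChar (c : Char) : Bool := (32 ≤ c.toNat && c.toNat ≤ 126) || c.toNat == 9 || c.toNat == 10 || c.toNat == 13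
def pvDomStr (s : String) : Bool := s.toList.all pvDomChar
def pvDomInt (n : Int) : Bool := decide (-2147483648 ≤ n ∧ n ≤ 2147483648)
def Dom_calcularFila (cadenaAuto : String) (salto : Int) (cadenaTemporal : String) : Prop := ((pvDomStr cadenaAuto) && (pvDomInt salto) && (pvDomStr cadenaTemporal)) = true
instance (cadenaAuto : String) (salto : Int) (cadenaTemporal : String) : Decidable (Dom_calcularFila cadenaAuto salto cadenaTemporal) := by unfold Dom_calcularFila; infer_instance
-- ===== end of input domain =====

-- B replaces A's block-consuming while loop with a single per-position pass keyed by the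
-- parity of (i+1)//salto (simpler, one comprehension); A = B wherever A returns
-- (Pre_ excludes salto ≤ 0 with a nonempty string, on which A loops forever and never returns).


-- ===== PORT A =====
-- the while loop; fuel makes it total (for salto ≥ 1 it never runs out, see pvLoopA_eq_gen)
def pvLoopA (salto : Int) (nblock : List Char) (auto temporal : List Char) (fuel : Nat) : List Char :=
  match fuel with
  | 0 => temporal
  | f + 1 =>
    if auto.length > 0 then
      pvLoopA salto nblock (PySem.List.slice auto (some (salto * 2)) none)
        ((temporal ++ PySem.List.slice auto none (some salto)) ++ nblock) f
    else temporal

def calcularFila (cadenaAuto : String) (salto : Int) (cadenaTemporal : String) : String :=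
  let orig := cadenaAuto.toList
  let auto := PySem.List.slice orig (some (salto - 1)) none
  let temporal := cadenaTemporal.toList ++ PySem.List.pyRepeat ['N'] (salto - 1)
  let nblock := PySem.List.pyRepeat ['N'] salto
  let res := pvLoopA salto nblock auto temporal auto.length
  String.mk (PySem.List.slice res none (some (orig.length : Int)))

-- ===== PORT B =====
def calcularFila_alt (cadenaAuto : String) (salto : Int) (cadenaTemporal : String) : String :=
  let orig := cadenaAuto.toList
  let chars := (PySem.List.enumerate orig).map (fun p =>
    if PySem.Int.mod (PySem.Int.floordiv (p.1 + 1) salto) 2 == 1 then p.2 else 'N')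
  String.mk (PySem.List.slice (cadenaTemporal.toList ++ chars) none (some (orig.length : Int)))

-- ===== PRECONDITION & SPEC =====
-- Pre_ excludes salto ≤ 0 with a nonempty cadenaAuto: there A's while loop never terminates
-- (the string never shrinks), so A returns on exactly the inputs admitted here.
def Pre_calcularFila (cadenaAuto : String) (salto : Int) (cadenaTemporal : String) : Prop :=
  1 ≤ salto ∨ cadenaAuto = ""

instance (cadenaAuto : String) (salto : Int) (cadenaTemporal : String) : Decidable (Pre_calcularFila cadenaAuto salto cadenaTemporal) := by unfold Pre_calcularFila; infer_instance

def pvWitness_calcularFila : String × Int × String := ("abcdefgh", 2, "xy")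

def Spec_calcularFila (cadenaAuto : String) (salto : Int) (cadenaTemporal : String) (out : String) : Prop := out = calcularFila_alt cadenaAuto salto cadenaTemporal
instance (cadenaAuto : String) (salto : Int) (cadenaTemporal : String) (out : String) : Decidable (Spec_calcularFila cadenaAuto salto cadenaTemporal out) := by unfold Spec_calcularFila; infer_instance

-- ===== CLAIM (what is proved, stated in full; the proofs are below) =====
def Claim_equal_calcularFila : Prop := ∀ (cadenaAuto : String) (salto : Int) (cadenaTemporal : String), Dom_calcularFila cadenaAuto salto cadenaTemporal → Pre_calcularFila cadenaAuto salto cadenaTemporal → Spec_calcularFila cadenaAuto salto cadenaTemporal (calcularFila cadenaAuto salto cadenaTemporal)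

-- ===== LEMMAS AND PROOFS =====

-- the loop's mask, freed of the accumulator
def pvGen (t : Nat) (auto : List Char) (fuel : Nat) : List Char :=
  match fuel with
  | 0 => []
  | f + 1 =>
    if auto.length > 0 then
      (auto.take t ++ List.replicate t 'N') ++ pvGen t (auto.drop (2 * t)) f
    else []

theorem pvLoopA_eq_gen (t : Nat) :
    ∀ (fuel : Nat) (auto temporal : List Char),
      pvLoopA (t : Int) (List.replicate t 'N') auto temporal fuel
        = temporal ++ pvGen t auto fuel := by
  intro fuel
  induction fuel with
  | zero => intro auto temporal; simp [pvLoopA, pvGen]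
  | succ f ih =>
    intro auto temporal
    by_cases h : auto.length > 0
    · rw [pvLoopA, pvGen]
      simp only [h, if_pos]
      rw [show ((t : Int) * 2) = ((2 * t : Nat) : Int) by push_cast; ring,
        PySem.List.slice_from_natCast, PySem.List.slice_to_natCast, ih]
      simp [List.append_assoc]
    · rw [pvLoopA, pvGen]; simp [h]

theorem pvGen_length (t : Nat) (ht : 1 ≤ t) :
    ∀ (fuel : Nat) (auto : List Char), auto.length ≤ fuel →
      auto.length ≤ (pvGen t auto fuel).length := by
  intro fuel
  induction fuel with
  | zero => intro auto h; simpa [pvGen] using h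
  | succ f ih =>
    intro auto h
    by_cases hne : auto.length > 0
    · rw [pvGen]; simp only [hne, if_pos]
      have hrec := ih (auto.drop (2 * t)) (by simp; omega)
      simp only [List.length_append, List.length_take, List.length_replicate,
        List.length_drop] at *
      omega
    · simp [pvGen]; omega

theorem pvGen_getElem? (t : Nat) (ht : 1 ≤ t) :
    ∀ (fuel : Nat) (auto : List Char), auto.length ≤ fuel →
      ∀ j, j < auto.length →
        (pvGen t auto fuel)[j]? = if (j / t) % 2 = 0 then auto[j]? else some 'N' := by
  intro fuel
  induction fuel with
  | zero => intro auto h j hj; omega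
  | succ f ih =>
    intro auto h j hj
    have hne : auto.length > 0 := by omega
    rw [pvGen]; simp only [hne, if_pos]
    by_cases h1 : j < t
    · have hjlt : j < (auto.take t ++ List.replicate t 'N').length := by
        simp [List.length_take, List.length_replicate]; omega
      rw [List.getElem?_append_left hjlt]
      have hq : j / t = 0 := Nat.div_eq_of_lt h1
      rw [List.getElem?_append_left (by simp [List.length_take]; omega),
        List.getElem?_take_of_lt h1]
      simp [hq]
    · by_cases h3 : j < 2 * t
      · -- the 'N' half of this block
        have hjlt : j < (auto.take t ++ List.replicate t 'N').length := by
          simp [List.length_take, List.length_replicate]; omega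
        rw [List.getElem?_append_left hjlt]
        have htk : (auto.take t).length = t := by simp [List.length_take]; omega
        rw [List.getElem?_append_right (by omega), htk]
        have hq : j / t = 1 := Nat.div_eq_of_lt_le (by omega) (by omega)
        simp [hq, List.getElem?_replicate]
        omega
      · -- the recursive region
        have hlen : (auto.take t ++ List.replicate t 'N').length = 2 * t := by
          simp [List.length_take, List.length_replicate]; omega
        rw [List.getElem?_append_right (by omega), hlen]
        rw [ih (auto.drop (2 * t)) (by simp; omega) (j - 2 * t)
          (by simp [List.length_drop]; omega)]
        have hd := Nat.add_mul_div_left (j - 2 * t) 2 (by omega : 0 < t)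
        rw [show j - 2 * t + t * 2 = j by omega] at hd
        have hpar : (j - 2 * t) / t % 2 = j / t % 2 := by omega
        rw [hpar, List.getElem?_drop]
        congr 2
        omega

theorem pvChars_getElem? (orig : List Char) (t : Nat) (j : Nat)
    (hj : j < orig.length) :
    ((PySem.List.enumerate orig).map (fun p =>
      if PySem.Int.mod (PySem.Int.floordiv (p.1 + 1) (t : Int)) 2 == 1 then p.2 else 'N'))[j]?
      = if ((j + 1) / t) % 2 = 1 then orig[j]? else some 'N' := by
  rw [List.getElem?_map, PySem.List.getElem?_enumerate,
    List.getElem?_eq_getElem hj]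
  simp only [Option.map_some]
  rw [show (0 : Int) + (j : Int) + 1 = ((j + 1 : Nat) : Int) by push_cast; ring,
    PySem.Int.floordiv_natCast,
    show (2 : Int) = ((2 : Nat) : Int) by norm_num,
    PySem.Int.mod_natCast]
  set a := (j + 1) / t % 2 with ha
  by_cases hpar : a = 1
  · simp [hpar]
  · have hc : ((a : Nat) : Int) ≠ 1 := by exact_mod_cast hpar
    simp [hpar, hc]

-- ===== VERDICT (by name: the statement is the Claim_ definition above) =====
theorem calcularFila_spec : Claim_equal_calcularFila := by
  intro cadenaAuto salto cadenaTemporal _hdom hpre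
  unfold Spec_calcularFila calcularFila calcularFila_alt
  rcases hpre with hs | hempty
  · -- salto ≥ 1
    lift salto to ℕ using (by omega : (0:Int) ≤ salto) with t ht
    have ht1 : 1 ≤ t := by exact_mod_cast hs
    set orig := cadenaAuto.toList with horig
    set param := cadenaTemporal.toList with hparam
    have hrep1 : PySem.List.pyRepeat ['N'] ((t : Int) - 1) = List.replicate (t - 1) 'N' := by
      rw [PySem.List.pyRepeat_singleton]; congr 1; omega
    have hrep2 : PySem.List.pyRepeat ['N'] (t : Int) = List.replicate t 'N' := by
      rw [PySem.List.pyRepeat_singleton]; simp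
    have hauto : PySem.List.slice orig (some ((t : Int) - 1)) none = orig.drop (t - 1) := by
      rw [show ((t : Int) - 1) = ((t - 1 : Nat) : Int) by omega,
        PySem.List.slice_from_natCast]
    simp only [hrep1, hrep2, hauto]
    set auto := orig.drop (t - 1) with hA
    rw [pvLoopA_eq_gen t, PySem.List.slice_to_natCast, PySem.List.slice_to_natCast,
      List.append_assoc]
    set fuel := auto.length with hfuel
    have hgl := pvGen_length t ht1 fuel auto (le_refl _)
    have hauto_len : auto.length = orig.length - (t - 1) := by simp [hA]
    apply congrArg
    apply List.ext_getElem?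
    intro i
    by_cases hiL : i < orig.length
    · rw [List.getElem?_take_of_lt hiL, List.getElem?_take_of_lt hiL]
      by_cases hip : i < param.length
      · rw [List.getElem?_append_left hip, List.getElem?_append_left hip]
      · have hip' : param.length ≤ i := by omega
        rw [List.getElem?_append_right hip', List.getElem?_append_right hip']
        set m := i - param.length with hm
        have hmL : m < orig.length := by omega
        rw [pvChars_getElem? orig t m hmL]
        by_cases hpre : m < t - 1
        · rw [List.getElem?_append_left
            (show m < (List.replicate (t - 1) 'N').length by simp; omega)]
          have hq : (m + 1) / t = 0 := Nat.div_eq_of_lt (by omega)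
          simp [List.getElem?_replicate, hpre, hq]
        · rw [List.getElem?_append_right
            (show (List.replicate (t - 1) 'N').length ≤ m by simp; omega)]
          simp only [List.length_replicate]
          set k := m - (t - 1) with hk
          have hkA : k < auto.length := by omega
          rw [pvGen_getElem? t ht1 fuel auto (le_refl _) k hkA]
          have hdiv : (m + 1) / t = k / t + 1 := by
            rw [show m + 1 = k + t * 1 by omega,
              Nat.add_mul_div_left _ _ (by omega : 0 < t)]
          have hak : auto[k]? = orig[m]? := by
            rw [hA, List.getElem?_drop]
            congr 1
            omega
          rw [hak, hdiv]
          by_cases hp : k / t % 2 = 0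
          · have h1 : (k / t + 1) % 2 = 1 := by omega
            simp [hp, h1]
          · have h1 : (k / t + 1) % 2 ≠ 1 := by omega
            simp [hp, h1]
    · rw [List.getElem?_eq_none (by simp [List.length_take]; omega),
        List.getElem?_eq_none (by simp [List.length_take]; omega)]
  · -- empty cadenaAuto: both results are truncated to length 0
    subst hempty
    dsimp only
    rw [PySem.List.slice_to _ (by positivity), PySem.List.slice_to _ (by positivity)]
    simp
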